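-- pv_equiv track=rewrite | github.com/awiteck/thesis | scripts/utils.py | remove_overlapping_indices
-- ===== SOURCE A (Python) =====
-- def remove_overlapping_indices(primary_set, secondary_set, T):
--     """
--     Remove indices from the secondary_set that overlap with any index in the primary_set,
--     considering the input length T.
--     """
--     to_remove = set()
--     for primary_index in primary_set:
--         # Calculate the range of indices that would overlap with primary_index considering T
--         overlapping_range = set(range(primary_index[0] - T + 1, primary_index[1] + T))
--         to_remove |= (
--             overlapping_range & secondary_set
--         )  # Find and add overlapping indices
--     secondary_set -= to_remove  # Remove overlapping indices
--     return secondary_set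
-- ===== SOURCE B (Python) =====
-- def remove_overlapping_indices(primary_set, secondary_set, T):
--     """
--     Sort the T-expanded primary intervals once and answer each secondary index
--     by binary search over interval starts plus a prefix-maximum of interval
--     ends, instead of materialising every integer of every expanded range.
--     Like A, mutates secondary_set in place to the returned set.
--     """
--     ivs = sorted(((p[0] - T + 1, p[1] + T) for p in primary_set), key=lambda iv: iv[0])
--     starts = [iv[0] for iv in ivs]
--     reach = []  # reach[i] = max end among ivs[0..i]
--     m = None
--     for iv in ivs:
--         if m is None or iv[1] > m:
--             m = iv[1]
--         reach.append(m)
--     kept = set()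
--     for s in secondary_set:
--         lo, hi = 0, len(starts)
--         while lo < hi:
--             mid = (lo + hi) // 2
--             if starts[mid] <= s:
--                 lo = mid + 1
--             else:
--                 hi = mid
--         if lo == 0 or reach[lo - 1] <= s:
--             kept.add(s)
--     secondary_set &= kept
--     return secondary_set
-- ===== Notes on version B (the rewrite author's own statement) =====
-- stated objective: faster
-- what changed: B sorts the T-expanded primary intervals once, precomputes a prefix-maximum of interval ends, and decides each secondary index by binary search over interval starts, instead of A's materialising every integer of every expanded range as a set and intersecting/unioning/differencing sets.
import Mathlib
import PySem

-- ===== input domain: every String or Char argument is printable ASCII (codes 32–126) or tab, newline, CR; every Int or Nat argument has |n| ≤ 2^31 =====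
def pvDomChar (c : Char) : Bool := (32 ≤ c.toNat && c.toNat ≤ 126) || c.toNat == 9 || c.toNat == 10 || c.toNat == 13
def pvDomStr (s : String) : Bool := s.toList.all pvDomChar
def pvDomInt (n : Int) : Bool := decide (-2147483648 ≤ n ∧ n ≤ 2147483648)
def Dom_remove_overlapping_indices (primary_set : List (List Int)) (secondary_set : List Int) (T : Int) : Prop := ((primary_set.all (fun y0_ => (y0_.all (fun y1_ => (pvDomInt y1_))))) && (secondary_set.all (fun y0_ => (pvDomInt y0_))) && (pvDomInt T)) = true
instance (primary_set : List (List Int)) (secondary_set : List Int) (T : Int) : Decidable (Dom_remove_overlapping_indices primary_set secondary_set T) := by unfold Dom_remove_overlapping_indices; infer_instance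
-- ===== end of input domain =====

-- B replaces A's per-primary enumeration of every integer in the T-expanded range by a direct
-- interval test on each secondary index (objective: faster — no range materialisation).
-- Both A and B mutate secondary_set in place in Python; the equivalence here is about the return value.

-- ===== PORT A =====
def remove_overlapping_indices (primary_set : List (List Int)) (secondary_set : List Int) (T : Int) : List Int :=
  let to_remove : PySem.Set Int :=
    primary_set.foldl
      (fun to_remove primary_index =>
        let overlapping_range : PySem.Set Int :=
          PySem.Set.ofList (PySem.List.pyRange
            (PySem.List.pyGetD primary_index 0 0 - T + 1)
            (PySem.List.pyGetD primary_index 1 0 + T) 1)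
        PySem.Set.union to_remove
          (PySem.Set.inter overlapping_range (PySem.Set.ofList secondary_set)))
      PySem.Set.empty
  PySem.Set.diff (PySem.Set.ofList secondary_set) to_remove

-- ===== PORT B =====
-- binary search: Python's `while lo < hi: mid=(lo+hi)//2; ...` loop from Source B,
-- run on structural fuel `hi - lo` (each iteration shrinks the range by at least one)
def pvBsFuel (starts : List Int) (s : Int) : Nat → Nat → Nat → Nat
  | 0, lo, _ => lo
  | fuel + 1, lo, hi =>
    if lo < hi then
      let mid := (lo + hi) / 2
      if PySem.List.pyGetD starts (mid : Int) 0 ≤ s then pvBsFuel starts s fuel (mid + 1) hi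
      else pvBsFuel starts s fuel lo mid
    else lo

def pvBs (starts : List Int) (s : Int) (lo hi : Nat) : Nat :=
  pvBsFuel starts s (hi - lo) lo hi

-- one step of Source B's running-maximum loop (`if m is None or iv[1] > m: m = iv[1]; reach.append(m)`)
def pvStep (acc : Option Int × List Int) (iv : Int × Int) : Option Int × List Int :=
  let m := match acc.1 with
    | none => iv.2
    | some m0 => if iv.2 > m0 then iv.2 else m0
  (some m, acc.2 ++ [m])

def pvReach (ivs : List (Int × Int)) : List Int := (ivs.foldl pvStep (none, [])).2

def remove_overlapping_indices_alt (primary_set : List (List Int)) (secondary_set : List Int) (T : Int) : List Int :=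
  let ivs := PySem.List.sorted
      (primary_set.map (fun p => (PySem.List.pyGetD p 0 0 - T + 1, PySem.List.pyGetD p 1 0 + T)))
      (fun iv => iv.1) false
  let starts := ivs.map (fun iv => iv.1)
  let reach := pvReach ivs
  let kept : PySem.Set Int :=
    (PySem.Set.ofList secondary_set).foldl
      (fun kept s =>
        if pvBs starts s 0 starts.length = 0 ∨
            PySem.List.pyGetD reach ((pvBs starts s 0 starts.length : Int) - 1) 0 ≤ s
        then PySem.Set.add kept s else kept)
      PySem.Set.empty
  PySem.Set.inter (PySem.Set.ofList secondary_set) kept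

-- ===== PRECONDITION & SPEC =====
-- Pre_ excludes exactly the inputs where the Python raises IndexError: a primary tuple with fewer than two components.
def Pre_remove_overlapping_indices (primary_set : List (List Int)) (secondary_set : List Int) (T : Int) : Prop :=
  ∀ p ∈ primary_set, 2 ≤ p.length
instance (primary_set : List (List Int)) (secondary_set : List Int) (T : Int) : Decidable (Pre_remove_overlapping_indices primary_set secondary_set T) := by unfold Pre_remove_overlapping_indices; infer_instance

def pvWitness_remove_overlapping_indices : List (List Int) × List Int × Int := ([[0, 2]], [1, 5, 10], 2)

def Spec_remove_overlapping_indices (primary_set : List (List Int)) (secondary_set : List Int) (T : Int) (out : List Int) : Prop := out = remove_overlapping_indices_alt primary_set secondary_set T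
instance (primary_set : List (List Int)) (secondary_set : List Int) (T : Int) (out : List Int) : Decidable (Spec_remove_overlapping_indices primary_set secondary_set T out) := by unfold Spec_remove_overlapping_indices; infer_instance

-- ===== CLAIM (what is proved, stated in full; the proofs are below) =====
def Claim_equal_remove_overlapping_indices : Prop := ∀ (primary_set : List (List Int)) (secondary_set : List Int) (T : Int), Dom_remove_overlapping_indices primary_set secondary_set T → Pre_remove_overlapping_indices primary_set secondary_set T → Spec_remove_overlapping_indices primary_set secondary_set T (remove_overlapping_indices primary_set secondary_set T)

-- ===== LEMMAS AND PROOFS =====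

/-- Membership in A's accumulated `to_remove` set: a fold of unions. -/
lemma mem_foldl_union (f : List Int → PySem.Set Int) (x : Int) :
    ∀ (l : List (List Int)) (acc : PySem.Set Int),
      x ∈ l.foldl (fun a p => PySem.Set.union a (f p)) acc ↔ x ∈ acc ∨ ∃ p ∈ l, x ∈ f p := by
  intro l
  induction l with
  | nil => simp [List.foldl]
  | cons hd tl ih =>
    intro acc
    simp only [List.foldl_cons, ih, PySem.Set.mem_union, List.mem_cons]
    constructor
    · rintro (⟨h | h⟩ | ⟨p, hp, hx⟩)
      · exact Or.inl h
      · exact Or.inr ⟨hd, Or.inl rfl, h⟩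
      · exact Or.inr ⟨p, Or.inr hp, hx⟩
    · rintro (h | ⟨p, hp | hp, hx⟩)
      · exact Or.inl (Or.inl h)
      · exact Or.inl (Or.inr (hp ▸ hx))
      · exact Or.inr ⟨p, hp, hx⟩

/-- Membership in B's `kept` set: a fold of conditional adds. -/
lemma mem_foldl_add_if (C : Int → Prop) [DecidablePred C] (x : Int) :
    ∀ (l : List Int) (acc : PySem.Set Int),
      x ∈ l.foldl (fun k s => if C s then PySem.Set.add k s else k) acc ↔
        x ∈ acc ∨ ∃ s ∈ l, C s ∧ x = s := by
  intro l
  induction l with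
  | nil => simp [List.foldl]
  | cons hd tl ih =>
    intro acc
    simp only [List.foldl_cons, ih, List.mem_cons]
    by_cases hC : C hd
    · simp only [if_pos hC, PySem.Set.mem_add]
      constructor
      · rintro (⟨h | h⟩ | ⟨s, hs, hCs, hx⟩)
        · exact Or.inl h
        · exact Or.inr ⟨hd, Or.inl rfl, hC, h⟩
        · exact Or.inr ⟨s, Or.inr hs, hCs, hx⟩
      · rintro (h | ⟨s, hs | hs, hCs, hx⟩)
        · exact Or.inl (Or.inl h)
        · exact Or.inl (Or.inr (hs ▸ hx))
        · exact Or.inr ⟨s, hs, hCs, hx⟩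
    · simp only [if_neg hC]
      constructor
      · rintro (h | ⟨s, hs, hCs, hx⟩)
        · exact Or.inl h
        · exact Or.inr ⟨s, Or.inr hs, hCs, hx⟩
      · rintro (h | ⟨s, hs | hs, hCs, hx⟩)
        · exact Or.inl h
        · exact absurd (hs ▸ hCs) hC
        · exact Or.inr ⟨s, hs, hCs, hx⟩

/-- The new running maximum after one step of Source B's loop. -/
def pvNewMax (m0 : Option Int) (e : Int) : Int :=
  match m0 with
  | none => e
  | some m0' => if e > m0' then e else m0'

lemma pvNewMax_le_iff (m0 : Option Int) (e x : Int) :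
    pvNewMax m0 e ≤ x ↔ (∀ m, m0 = some m → m ≤ x) ∧ e ≤ x := by
  cases m0 with
  | none => simp [pvNewMax]
  | some m0' =>
    simp only [pvNewMax, Option.some.injEq, forall_eq']
    split_ifs <;> omega

/-- The recursive shape of Source B's running-maximum loop. -/
def pvScan : Option Int → List (Int × Int) → List Int
  | _, [] => []
  | m0, iv :: tl => pvNewMax m0 iv.2 :: pvScan (some (pvNewMax m0 iv.2)) tl

lemma foldl_pvStep_snd : ∀ (ivs : List (Int × Int)) (m0 : Option Int) (l0 : List Int),
    (ivs.foldl pvStep (m0, l0)).2 = l0 ++ pvScan m0 ivs := by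
  intro ivs
  induction ivs with
  | nil => simp [pvScan]
  | cons iv tl ih =>
    intro m0 l0
    rw [List.foldl_cons]
    have hstep : pvStep (m0, l0) iv = (some (pvNewMax m0 iv.2), l0 ++ [pvNewMax m0 iv.2]) := by
      cases m0 <;> rfl
    rw [hstep, ih]
    simp [pvScan]

lemma pvReach_eq_pvScan (ivs : List (Int × Int)) : pvReach ivs = pvScan none ivs := by
  simpa [pvReach] using foldl_pvStep_snd ivs none []

/-- `pvScan` value at `j` is ≤ x iff the carried maximum and all interval ends up to `j` are ≤ x. -/
lemma pvScan_le_iff : ∀ (ivs : List (Int × Int)) (m0 : Option Int) (j : Nat), j < ivs.length →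
    ∀ (x : Int), ((pvScan m0 ivs).getD j 0 ≤ x ↔
      (∀ m, m0 = some m → m ≤ x) ∧ ∀ i, (hi : i < ivs.length) → i ≤ j → ivs[i].2 ≤ x) := by
  intro ivs
  induction ivs with
  | nil => intro m0 j hj; simp at hj
  | cons iv tl ih =>
    intro m0 j hj x
    cases j with
    | zero =>
      simp only [pvScan, List.getD_cons_zero]
      rw [pvNewMax_le_iff]
      constructor
      · rintro ⟨hm, he⟩
        refine ⟨hm, ?_⟩
        intro i hi hi0
        interval_cases i
        simpa using he
      · rintro ⟨hm, hall⟩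
        exact ⟨hm, by simpa using hall 0 (by simp) (le_refl 0)⟩
    | succ j =>
      have hjt : j < tl.length := by simpa using Nat.lt_of_succ_lt_succ hj
      simp only [pvScan, List.getD_cons_succ]
      rw [ih _ j hjt x]
      simp only [Option.some.injEq, forall_eq']
      rw [pvNewMax_le_iff]
      constructor
      · rintro ⟨⟨hm, he⟩, hall⟩
        refine ⟨hm, ?_⟩
        intro i hi hij
        cases i with
        | zero => simpa using he
        | succ i =>
          simpa using hall i (by simpa using Nat.lt_of_succ_lt_succ hi) (by omega)
      · rintro ⟨hm, hall⟩
        have he : iv.2 ≤ x := by simpa using hall 0 (by simp) (by omega)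
        refine ⟨⟨hm, he⟩, ?_⟩
        intro i hi hij
        simpa using hall (i + 1) (by simpa using Nat.succ_lt_succ hi) (by omega)

/-- Binary-search postcondition on a non-decreasing list. -/
lemma pvBsFuel_spec (starts : List Int) (x : Int)
    (hmono : starts.Pairwise (· ≤ ·)) :
    ∀ (n lo hi : Nat), hi - lo ≤ n → lo ≤ hi → hi ≤ starts.length →
    (∀ i, (h : i < starts.length) → i < lo → starts[i] ≤ x) →
    (∀ i, (h : i < starts.length) → hi ≤ i → x < starts[i]) →
    (lo ≤ pvBsFuel starts x n lo hi ∧ pvBsFuel starts x n lo hi ≤ hi) ∧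
    (∀ i, (h : i < starts.length) → i < pvBsFuel starts x n lo hi → starts[i] ≤ x) ∧
    (∀ i, (h : i < starts.length) → pvBsFuel starts x n lo hi ≤ i → x < starts[i]) := by
  have hmono' : ∀ i j, (hi : i < starts.length) → (hj : j < starts.length) → i ≤ j →
      starts[i] ≤ starts[j] := by
    intro i j hi hj hij
    rcases Nat.lt_or_ge i j with h | h
    · exact (List.pairwise_iff_getElem.mp hmono) i j hi hj h
    · have : i = j := by omega
      subst this; exact le_refl _
  intro n
  induction n with
  | zero =>
    intro lo hi hn hlh hhl hleft hright
    simp only [pvBsFuel]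
    exact ⟨⟨le_refl _, by omega⟩, fun i h hi => hleft i h hi, fun i h hi => hright i h (by omega)⟩
  | succ n ih =>
    intro lo hi hn hlh hhl hleft hright
    by_cases hlo : lo < hi
    · rw [pvBsFuel, if_pos hlo]
      have hmid1 : lo ≤ (lo + hi) / 2 := by omega
      have hmid2 : (lo + hi) / 2 < hi := by omega
      have hmlen : (lo + hi) / 2 < starts.length := by omega
      have hget : PySem.List.pyGetD starts (((lo + hi) / 2 : Nat) : Int) 0 =
          starts[(lo + hi) / 2] := by
        rw [PySem.List.pyGetD_natCast]
        simp [List.getD_eq_getElem?_getD, hmlen]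
      by_cases hc : PySem.List.pyGetD starts (((lo + hi) / 2 : Nat) : Int) 0 ≤ x
      · simp only [if_pos hc]
        have hleft' : ∀ i, (h : i < starts.length) → i < (lo + hi) / 2 + 1 → starts[i] ≤ x := by
          intro i h hilt
          have : starts[i] ≤ starts[(lo + hi) / 2] := hmono' i _ h hmlen (by omega)
          rw [hget] at hc
          omega
        obtain ⟨⟨h1, h2⟩, h3, h4⟩ :=
          ih ((lo + hi) / 2 + 1) hi (by omega) (by omega) hhl hleft' hright
        exact ⟨⟨by omega, h2⟩, h3, h4⟩
      · simp only [if_neg hc]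
        have hright' : ∀ i, (h : i < starts.length) → (lo + hi) / 2 ≤ i → x < starts[i] := by
          intro i h hile
          have : starts[(lo + hi) / 2] ≤ starts[i] := hmono' _ i hmlen h hile
          rw [hget] at hc
          omega
        obtain ⟨⟨h1, h2⟩, h3, h4⟩ :=
          ih lo ((lo + hi) / 2) (by omega) (by omega) (by omega) hleft hright'
        exact ⟨⟨h1, by omega⟩, h3, h4⟩
    · rw [pvBsFuel, if_neg hlo]
      exact ⟨⟨le_refl _, by omega⟩, fun i h hi => hleft i h hi,
        fun i h hi => hright i h (by omega)⟩

lemma pvBs_spec (starts : List Int) (x : Int)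
    (hmono : starts.Pairwise (· ≤ ·)) (lo hi : Nat) (hlh : lo ≤ hi) (hhl : hi ≤ starts.length)
    (hleft : ∀ i, (h : i < starts.length) → i < lo → starts[i] ≤ x)
    (hright : ∀ i, (h : i < starts.length) → hi ≤ i → x < starts[i]) :
    (lo ≤ pvBs starts x lo hi ∧ pvBs starts x lo hi ≤ hi) ∧
    (∀ i, (h : i < starts.length) → i < pvBs starts x lo hi → starts[i] ≤ x) ∧
    (∀ i, (h : i < starts.length) → pvBs starts x lo hi ≤ i → x < starts[i]) :=
  pvBsFuel_spec starts x hmono (hi - lo) lo hi (le_refl _) hlh hhl hleft hright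

/-- B's keep-condition at `x` is exactly "x avoids every T-expanded primary interval". -/
lemma keep_iff (primary_set : List (List Int)) (T x : Int) :
    (pvBs ((PySem.List.sorted
        (primary_set.map (fun p => (PySem.List.pyGetD p 0 0 - T + 1, PySem.List.pyGetD p 1 0 + T)))
        (fun iv => iv.1) false).map (fun iv => iv.1)) x 0
        ((PySem.List.sorted
        (primary_set.map (fun p => (PySem.List.pyGetD p 0 0 - T + 1, PySem.List.pyGetD p 1 0 + T)))
        (fun iv => iv.1) false).map (fun iv => iv.1)).length = 0 ∨
      PySem.List.pyGetD (pvReach (PySem.List.sorted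
        (primary_set.map (fun p => (PySem.List.pyGetD p 0 0 - T + 1, PySem.List.pyGetD p 1 0 + T)))
        (fun iv => iv.1) false))
        ((pvBs ((PySem.List.sorted
        (primary_set.map (fun p => (PySem.List.pyGetD p 0 0 - T + 1, PySem.List.pyGetD p 1 0 + T)))
        (fun iv => iv.1) false).map (fun iv => iv.1)) x 0
        ((PySem.List.sorted
        (primary_set.map (fun p => (PySem.List.pyGetD p 0 0 - T + 1, PySem.List.pyGetD p 1 0 + T)))
        (fun iv => iv.1) false).map (fun iv => iv.1)).length : Int) - 1) 0 ≤ x) ↔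
    ∀ p ∈ primary_set, x ≤ PySem.List.pyGetD p 0 0 - T ∨ PySem.List.pyGetD p 1 0 + T ≤ x := by
  set ivs := PySem.List.sorted
      (primary_set.map (fun p => (PySem.List.pyGetD p 0 0 - T + 1, PySem.List.pyGetD p 1 0 + T)))
      (fun iv => iv.1) false with hivs
  set starts := ivs.map (fun iv => iv.1) with hstarts
  set r := pvBs starts x 0 starts.length with hr
  have hmono : starts.Pairwise (· ≤ ·) := PySem.List.sorted_map_key_pairwise ..
  have hlen : starts.length = ivs.length := List.length_map ..
  obtain ⟨⟨hr0, hrhi⟩, hbelow, habove⟩ :=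
    pvBs_spec starts x hmono 0 starts.length (by omega) (le_refl _)
      (fun i h hi => absurd hi (by omega)) (fun i h hi => absurd h (by omega))
  have hstarts_get : ∀ i, (h : i < ivs.length) → starts[i]'(by omega) = ivs[i].1 := by
    intro i h
    simp [hstarts]
  have hrhs : (∀ p ∈ primary_set,
      x ≤ PySem.List.pyGetD p 0 0 - T ∨ PySem.List.pyGetD p 1 0 + T ≤ x) ↔
      (∀ iv ∈ ivs, ¬(iv.1 ≤ x ∧ x < iv.2)) := by
    rw [hivs]
    constructor
    · intro hall iv hmem
      obtain ⟨p, hp, hpe⟩ := List.mem_map.mp ((PySem.List.mem_sorted ..).mp hmem)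
      rcases hall p hp with hc | hc <;> rw [← hpe] <;> simp only <;> omega
    · intro hall p hp
      have := hall _ ((PySem.List.mem_sorted ..).mpr (List.mem_map.mpr ⟨p, hp, rfl⟩))
      simp only at this
      omega
  have hidx : (∀ iv ∈ ivs, ¬(iv.1 ≤ x ∧ x < iv.2)) ↔
      (∀ i, (h : i < ivs.length) → ¬(ivs[i].1 ≤ x ∧ x < ivs[i].2)) := by
    constructor
    · intro hall i h
      exact hall _ (List.getElem_mem h)
    · intro hall iv hmem
      obtain ⟨i, h, rfl⟩ := List.mem_iff_getElem.mp hmem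
      exact hall i h
  rw [hrhs, hidx]
  by_cases hr0' : r = 0
  · simp only [hr0', true_or, true_iff]
    intro i h
    have := habove i (by omega) (by omega)
    rw [hstarts_get i h] at this
    omega
  · have hr1 : 1 ≤ r := by omega
    have hrlen : r ≤ ivs.length := by omega
    have hcast : ((r : Int) - 1) = (((r - 1 : Nat) : Nat) : Int) := by omega
    have hreach : PySem.List.pyGetD (pvReach ivs) ((r : Int) - 1) 0 =
        (pvScan none ivs).getD (r - 1) 0 := by
      rw [hcast, PySem.List.pyGetD_natCast, pvReach_eq_pvScan]
    rw [hreach]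
    have hscan := pvScan_le_iff ivs none (r - 1) (by omega) x
    constructor
    · rintro (h | h)
      · omega
      · intro i hilen
        by_cases hir : i < r
        · have hend : ivs[i].2 ≤ x := (hscan.mp h).2 i hilen (by omega)
          omega
        · have := habove i (by omega) (by omega)
          rw [hstarts_get i hilen] at this
          omega
    · intro hall
      right
      rw [hscan]
      refine ⟨by simp, ?_⟩
      intro i hilen hir
      have hstart : ivs[i].1 ≤ x := by
        have := hbelow i (by omega) (by omega)
        rwa [hstarts_get i hilen] at this
      have := hall i hilen
      omega

-- ===== VERDICT (by name: the statement is the Claim_ definition above) =====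
theorem remove_overlapping_indices_spec : Claim_equal_remove_overlapping_indices := by
  intro primary_set secondary_set T _ _
  unfold Spec_remove_overlapping_indices remove_overlapping_indices remove_overlapping_indices_alt
  show List.filter _ (PySem.Set.ofList secondary_set) = List.filter _ (PySem.Set.ofList secondary_set)
  apply List.filter_congr
  intro x hx
  have hxS : x ∈ secondary_set := (PySem.Set.mem_ofList secondary_set x).mp hx
  rw [Bool.eq_iff_iff]
  simp only [Bool.not_eq_true', PySem.Set.contains_eq_listContains, List.contains_eq_mem,
    decide_eq_false_iff_not, decide_eq_true_eq, mem_foldl_union,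
    PySem.Set.mem_inter, PySem.Set.mem_ofList, PySem.List.mem_pyRange_one,
    PySem.Set.empty, List.not_mem_nil, false_or]
  rw [mem_foldl_add_if _ x _ ([] : PySem.Set Int)]
  simp only [List.not_mem_nil, false_or]
  have hk := keep_iff primary_set T x
  constructor
  · intro h
    refine ⟨x, hx, ?_, rfl⟩
    rw [hk]
    intro p hp
    by_contra hcon
    rw [not_or, not_le, not_le] at hcon
    exact h ⟨p, hp, ⟨by omega, by omega⟩, hxS⟩
  · rintro ⟨s, hsmem, hC, rfl⟩ ⟨p, hp, ⟨h1, h2⟩, -⟩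
    rw [hk] at hC
    rcases hC p hp with h | h <;> omega
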